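-- pv_equiv track=rewrite | github.com/Pavelimg/BFU | TAYAT/L3.py | homski
-- ===== SOURCE A (Python) =====
-- def homski(n, string="S"):
--     string = string.replace("S", "AB")  # S → AB
--     for _ in range(n):  # A → CE
--         string = string.replace("A", "CE")  # A → CE
--         string = string.replace("E", "AD")  # E → AD
--     string = string.replace("A", ".")  # A → .
--     string = string.replace("B", "GD")  # B → 001
--     string = string.replace("G", "CC")  # G → CC
--     string = string.replace("C", "0")  # C → 0
--     string = string.replace("D", "1")  # D → 1
--     return string
-- ===== SOURCE B (Python) =====
-- def homski(n, string="S"):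
--     # Closed form: each input character expands independently.
--     m = n if n > 0 else 0
--     a = "0" * m + "." + "1" * m            # A after m loop rounds, finalized
--     e = "E" if m == 0 else "0" * (m - 1) + "." + "1" * m  # E after m rounds, finalized
--     table = {"S": a + "001", "A": a, "E": e, "B": "001", "G": "00", "C": "0", "D": "1"}
--     return "".join(table.get(c, c) for c in string)
-- ===== Notes on version B (the rewrite author's own statement) =====
-- stated objective: faster
-- what changed: B replaces A's n full rewriting passes over the growing string by a closed-form per-character expansion table (each input character's final expansion is computed once from n) applied in a single pass.
import Mathlib
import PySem

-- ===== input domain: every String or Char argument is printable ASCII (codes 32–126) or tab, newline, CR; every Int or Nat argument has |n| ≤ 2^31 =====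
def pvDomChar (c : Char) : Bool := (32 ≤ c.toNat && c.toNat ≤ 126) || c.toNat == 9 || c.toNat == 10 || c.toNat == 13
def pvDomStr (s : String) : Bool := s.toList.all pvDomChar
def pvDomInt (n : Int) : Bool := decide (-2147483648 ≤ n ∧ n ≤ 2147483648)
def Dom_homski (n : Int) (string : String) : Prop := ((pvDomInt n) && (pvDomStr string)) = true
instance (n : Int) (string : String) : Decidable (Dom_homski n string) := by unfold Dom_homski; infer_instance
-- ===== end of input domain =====

-- B replaces A's n rewriting passes over a growing string by a closed-form per-character
-- expansion table applied in one pass (objective: faster, asymptotically).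

-- ===== PORT A =====
def homski (n : Int) (string : String) : String :=
  let string := PySem.Str.replace string "S" "AB"
  let string := (PySem.List.pyRange 0 n 1).foldl (fun string _ =>
      let string := PySem.Str.replace string "A" "CE"
      PySem.Str.replace string "E" "AD") string
  let string := PySem.Str.replace string "A" "."
  let string := PySem.Str.replace string "B" "GD"
  let string := PySem.Str.replace string "G" "CC"
  let string := PySem.Str.replace string "C" "0"
  let string := PySem.Str.replace string "D" "1"
  string

-- ===== PORT B =====
-- "0" * m  is ported as String.ofList (List.replicate m.toNat '0') (exact for m ≥ 0,
-- and Source B's m is never negative); ''.join(gen) is PySem.Str.join "".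
def homski_alt (n : Int) (string : String) : String :=
  let m : Int := if 0 < n then n else 0
  let a : String := String.ofList (List.replicate m.toNat '0') ++ "." ++
                    String.ofList (List.replicate m.toNat '1')
  let e : String := if m = 0 then "E" else
                    String.ofList (List.replicate (m - 1).toNat '0') ++ "." ++
                    String.ofList (List.replicate m.toNat '1')
  let table : PySem.Dict Char String :=
    (((((((PySem.Dict.empty).insert 'S' (a ++ "001")).insert 'A' a).insert 'E' e).insert
        'B' "001").insert 'G' "00").insert 'C' "0").insert 'D' "1"
  PySem.Str.join "" (string.toList.map (fun c => table.getD c (String.ofList [c])))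

-- ===== PRECONDITION & SPEC =====
def Spec_homski (n : Int) (string : String) (out : String) : Prop := out = homski_alt n string
instance (n : Int) (string : String) (out : String) : Decidable (Spec_homski n string out) := by unfold Spec_homski; infer_instance

-- ===== CLAIM (what is proved, stated in full; the proofs are below) =====
def Claim_equal_homski : Prop := ∀ (n : Int) (string : String), Dom_homski n string → Spec_homski n string (homski n string)

-- ===== LEMMAS AND PROOFS =====

-- single-character substitution, the semantics of str.replace with a one-char pattern
def subst (o : Char) (new : List Char) (c : Char) : List Char := if c = o then new else [c]

-- one loop-body round, per character
def phi (c : Char) : List Char := (subst 'A' ['C', 'E'] c).flatMap (subst 'E' ['A', 'D'])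

-- k loop rounds, per character
def Phi : Nat → Char → List Char
  | 0, c => [c]
  | k + 1, c => (phi c).flatMap (Phi k)

-- the table of B's port, named so the lemmas below can talk about it
def tbl (n : Int) : PySem.Dict Char String :=
  let m : Int := if 0 < n then n else 0
  let a : String := String.ofList (List.replicate m.toNat '0') ++ "." ++
                    String.ofList (List.replicate m.toNat '1')
  let e : String := if m = 0 then "E" else
                    String.ofList (List.replicate (m - 1).toNat '0') ++ "." ++
                    String.ofList (List.replicate m.toNat '1')
  (((((((PySem.Dict.empty).insert 'S' (a ++ "001")).insert 'A' a).insert 'E' e).insert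
      'B' "001").insert 'G' "00").insert 'C' "0").insert 'D' "1"

lemma go_single (o : Char) (new : List Char) :
    ∀ (l : List Char) (fuel : Nat) (acc : List Char), l.length ≤ fuel →
      PySem.Chars.replace.go [o] new fuel l acc = acc.reverse ++ l.flatMap (subst o new) := by
  intro l
  induction l with
  | nil => intro fuel acc _; cases fuel <;> simp [PySem.Chars.replace.go]
  | cons c t ih =>
      intro fuel acc h
      cases fuel with
      | zero => simp at h
      | succ f =>
          simp only [PySem.Chars.replace.go, List.isPrefixOf, Bool.and_true]
          by_cases hc : o = c
          · subst hc
            simp only [BEq.rfl, if_true]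
            have hd : List.drop [o].length (o :: t) = t := by simp
            rw [hd, ih f (new.reverse ++ acc) (by simpa using h)]
            simp [subst]
          · have hb : (o == c) = false := by simpa using hc
            rw [hb]
            simp only [Bool.false_eq_true, if_false]
            rw [ih f (c :: acc) (by simpa using h)]
            simp [subst, Ne.symm hc]

lemma replace_single (s : List Char) (o : Char) (new : List Char) :
    PySem.Chars.replace s [o] new = s.flatMap (subst o new) := by
  simpa using go_single o new s s.length [] le_rfl

lemma step_toList (s : String) :
    (PySem.Str.replace (PySem.Str.replace s "A" "CE") "E" "AD").toList =
      s.toList.flatMap phi := by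
  rw [PySem.Str.toList_replace, PySem.Str.toList_replace]
  have hA : ("A" : String).toList = ['A'] := rfl
  have hCE : ("CE" : String).toList = ['C', 'E'] := rfl
  have hE : ("E" : String).toList = ['E'] := rfl
  have hAD : ("AD" : String).toList = ['A', 'D'] := rfl
  rw [hA, hCE, hE, hAD, replace_single, replace_single, List.flatMap_assoc]
  rfl

lemma loop_toList (l : List Int) (s : String) :
    (l.foldl (fun string _ =>
        PySem.Str.replace (PySem.Str.replace string "A" "CE") "E" "AD") s).toList =
      s.toList.flatMap (Phi l.length) := by
  induction l generalizing s with
  | nil => simp [Phi]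
  | cons x xs ih =>
      simp only [List.foldl_cons, List.length_cons]
      rw [ih, step_toList, List.flatMap_assoc]
      rfl

lemma Phi_other (k : Nat) (c : Char) (h1 : c ≠ 'A') (h2 : c ≠ 'E') : Phi k c = [c] := by
  induction k with
  | zero => rfl
  | succ k ih => simp [Phi, phi, subst, h1, h2, ih]

lemma Phi_A (k : Nat) : Phi k 'A' = List.replicate k 'C' ++ 'A' :: List.replicate k 'D' := by
  induction k with
  | zero => rfl
  | succ k ih =>
      have hC := Phi_other k 'C' (by decide) (by decide)
      have hD := Phi_other k 'D' (by decide) (by decide)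
      simp [Phi, phi, subst, ih, hC, hD, List.replicate_succ]
      rw [← List.replicate_succ', List.replicate_succ]

lemma Phi_E (k : Nat) :
    Phi (k + 1) 'E' = List.replicate k 'C' ++ 'A' :: List.replicate (k + 1) 'D' := by
  have hD := Phi_other k 'D' (by decide) (by decide)
  simp [Phi, phi, subst, Phi_A, hD, List.replicate_succ]
  rw [← List.replicate_succ', List.replicate_succ]

lemma flatMap_replicate_single (m : Nat) (c d : Char) (f : Char → List Char)
    (h : f c = [d]) : (List.replicate m c).flatMap f = List.replicate m d := by
  induction m with
  | zero => rfl
  | succ m ih => simp [List.replicate_succ, ih, h]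

lemma intercalate_nil_chars (l : List (List Char)) :
    List.intercalate ([] : List Char) l = l.flatten := by
  induction l with
  | nil => simp [List.intercalate]
  | cons x xs ih => cases xs <;> simp_all [List.intercalate, List.intersperse]

-- the five final replaces, per character (right-nested to match the simp normal form)
def fin (c : Char) : List Char :=
  (subst 'A' ['.'] c).flatMap (fun x =>
    (subst 'B' ['G', 'D'] x).flatMap (fun y =>
      (subst 'G' ['C', 'C'] y).flatMap (fun z =>
        (subst 'C' ['0'] z).flatMap (subst 'D' ['1']))))

lemma homski_toList (n : Int) (string : String) :
    (homski n string).toList =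
      string.toList.flatMap (fun c =>
        (subst 'S' ['A', 'B'] c).flatMap (fun x => (Phi n.toNat x).flatMap fin)) := by
  show (PySem.Str.replace (PySem.Str.replace (PySem.Str.replace (PySem.Str.replace
      (PySem.Str.replace ((PySem.List.pyRange 0 n 1).foldl (fun string _ =>
          PySem.Str.replace (PySem.Str.replace string "A" "CE") "E" "AD")
        (PySem.Str.replace string "S" "AB"))
      "A" ".") "B" "GD") "G" "CC") "C" "0") "D" "1").toList = _
  simp only [PySem.Str.toList_replace]
  rw [loop_toList]
  simp only [PySem.Str.toList_replace]
  have h1 : ("S" : String).toList = ['S'] := rfl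
  have h2 : ("AB" : String).toList = ['A', 'B'] := rfl
  have h3 : ("A" : String).toList = ['A'] := rfl
  have h4 : ("." : String).toList = ['.'] := rfl
  have h5 : ("B" : String).toList = ['B'] := rfl
  have h6 : ("GD" : String).toList = ['G', 'D'] := rfl
  have h7 : ("G" : String).toList = ['G'] := rfl
  have h8 : ("CC" : String).toList = ['C', 'C'] := rfl
  have h9 : ("C" : String).toList = ['C'] := rfl
  have h10 : ("0" : String).toList = ['0'] := rfl
  have h11 : ("D" : String).toList = ['D'] := rfl
  have h12 : ("1" : String).toList = ['1'] := rfl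
  rw [h1, h2, h3, h4, h5, h6, h7, h8, h9, h10, h11, h12]
  simp only [replace_single, List.flatMap_assoc, PySem.List.length_pyRange_one, Int.sub_zero]
  rfl

lemma homski_alt_toList (n : Int) (string : String) :
    (homski_alt n string).toList =
      string.toList.flatMap (fun c => ((tbl n).getD c (String.ofList [c])).toList) := by
  show (PySem.Str.join "" (string.toList.map (fun c =>
      (tbl n).getD c (String.ofList [c])))).toList = _
  rw [PySem.Str.toList_join]
  show PySem.Chars.join [] _ = _
  rw [PySem.Chars.join, intercalate_nil_chars, List.map_map, List.flatten_eq_flatMap]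
  simp [List.flatMap_def, Function.comp_def]

set_option maxHeartbeats 1000000 in
lemma per_char (n : Int) (c : Char) :
    (subst 'S' ['A', 'B'] c).flatMap (fun x => (Phi n.toNat x).flatMap fin) =
      ((tbl n).getD c (String.ofList [c])).toList := by
  have hm : (if 0 < n then n else 0).toNat = n.toNat := by omega
  have hm1 : ((if 0 < n then n else 0) - 1).toNat = n.toNat - 1 := by omega
  have f0 : fin 'C' = ['0'] := by decide
  have f1 : fin 'D' = ['1'] := by decide
  have fdot : fin 'A' = ['.'] := by decide
  have fB : fin 'B' = ['0', '0', '1'] := by decide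
  have fG : fin 'G' = ['0', '0'] := by decide
  have fE : fin 'E' = ['E'] := by decide
  have h001 : ("001" : String).toList = ['0', '0', '1'] := rfl
  have h00 : ("00" : String).toList = ['0', '0'] := rfl
  have hdot : ("." : String).toList = ['.'] := rfl
  have hEs : ("E" : String).toList = ['E'] := rfl
  have hA : (Phi n.toNat 'A').flatMap fin =
      List.replicate n.toNat '0' ++ '.' :: List.replicate n.toNat '1' := by
    rw [Phi_A]
    simp [List.flatMap_append, flatMap_replicate_single n.toNat 'C' '0' fin f0,
      flatMap_replicate_single n.toNat 'D' '1' fin f1, fdot]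
  by_cases hS : c = 'S'
  · subst hS
    have ht : (tbl n).getD 'S' (String.ofList ['S']) =
        (String.ofList (List.replicate (if 0 < n then n else 0).toNat '0') ++ "." ++
          String.ofList (List.replicate (if 0 < n then n else 0).toNat '1')) ++ "001" := rfl
    rw [ht]
    simp [subst, hA, hm, Phi_other n.toNat 'B' (by decide) (by decide), fB, h001, hdot]
  by_cases hAc : c = 'A'
  · subst hAc
    have ht : (tbl n).getD 'A' (String.ofList ['A']) =
        String.ofList (List.replicate (if 0 < n then n else 0).toNat '0') ++ "." ++
          String.ofList (List.replicate (if 0 < n then n else 0).toNat '1') := rfl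
    rw [ht]
    simp [subst, hA, hm, hdot]
  by_cases hE : c = 'E'
  · subst hE
    have ht : (tbl n).getD 'E' (String.ofList ['E']) =
        (if (if 0 < n then n else 0) = 0 then "E" else
          String.ofList (List.replicate ((if 0 < n then n else 0) - 1).toNat '0') ++ "." ++
          String.ofList (List.replicate (if 0 < n then n else 0).toNat '1')) := rfl
    rw [ht]
    rcases Nat.eq_zero_or_eq_succ_pred n.toNat with h0 | hsucc
    · have hz : (if 0 < n then n else 0) = 0 := by omega
      rw [hz, if_pos rfl, hEs]
      simp [subst, h0, Phi, fE]
    · have hpos : ¬ (if 0 < n then n else 0) = 0 := by omega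
      have hpos' : 0 < n.toNat := by omega
      rw [if_neg hpos]
      rw [show n.toNat = (n.toNat - 1) + 1 from by omega]
      simp [subst, Phi_E, hm, hm1, hdot,
        List.flatMap_append, flatMap_replicate_single (n.toNat - 1) 'C' '0' fin f0,
        flatMap_replicate_single (n.toNat - 1 + 1) 'D' '1' fin f1, fdot]
      omega
  by_cases hB : c = 'B'
  · subst hB
    have ht : (tbl n).getD 'B' (String.ofList ['B']) = "001" := rfl
    rw [ht, h001]
    simp [subst, Phi_other n.toNat 'B' (by decide) (by decide), fB]
  by_cases hG : c = 'G'
  · subst hG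
    have ht : (tbl n).getD 'G' (String.ofList ['G']) = "00" := rfl
    rw [ht, h00]
    simp [subst, Phi_other n.toNat 'G' (by decide) (by decide), fG]
  by_cases hC : c = 'C'
  · subst hC
    have ht : (tbl n).getD 'C' (String.ofList ['C']) = "0" := rfl
    rw [ht, show ("0" : String).toList = ['0'] from rfl]
    simp [subst, Phi_other n.toNat 'C' (by decide) (by decide), f0]
  by_cases hD : c = 'D'
  · subst hD
    have ht : (tbl n).getD 'D' (String.ofList ['D']) = "1" := rfl
    rw [ht, show ("1" : String).toList = ['1'] from rfl]
    simp [subst, Phi_other n.toNat 'D' (by decide) (by decide), f1]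
  · have bS : ('S' == c) = false := by simp [Ne.symm hS]
    have bA : ('A' == c) = false := by simp [Ne.symm hAc]
    have bE : ('E' == c) = false := by simp [Ne.symm hE]
    have bB : ('B' == c) = false := by simp [Ne.symm hB]
    have bG : ('G' == c) = false := by simp [Ne.symm hG]
    have bC : ('C' == c) = false := by simp [Ne.symm hC]
    have bD : ('D' == c) = false := by simp [Ne.symm hD]
    have ht : (tbl n).getD c (String.ofList [c]) = String.ofList [c] := by
      simp [tbl, PySem.Dict.getD, PySem.Dict.get?, PySem.Dict.insert, PySem.Dict.empty,
        PySem.Dict.contains, List.find?, bS, bA, bE, bB, bG, bC, bD]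
    rw [ht, String.toList_ofList]
    have hfin : fin c = [c] := by
      simp [fin, subst, hAc, hB, hG, hC, hD]
    simp [subst, hS, Phi_other n.toNat c hAc hE, hfin]

-- ===== VERDICT (by name: the statement is the Claim_ definition above) =====
theorem homski_spec : Claim_equal_homski := by
  intro n string _
  show homski n string = homski_alt n string
  apply String.toList_inj.mp
  rw [homski_toList, homski_alt_toList]
  exact List.flatMap_congr (fun c _ => per_char n c)
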